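-- pv_equiv track=rewrite | github.com/1010Min/Practice | programmers_python/coding_test_intro/day16_062.py | solution
-- ===== SOURCE A (Python) =====
-- def solution(array):
--     answer = []
--     num = array[0]
--
--     for i in range(1, len(array)):
--         if array[i] > num:
--             num = array[i]
--             answer = [num, i]
--
--     return answer
-- ===== SOURCE B (Python) =====
-- def solution(array):
--     first = array[0]          # raises IndexError on empty input, like A
--     mx = max(array)
--     if mx > first:
--         return [mx, array.index(mx)]
--     return []
-- ===== Notes on version B (the rewrite author's own statement) =====
-- stated objective: simpler
-- what changed: Replaces A's single interleaved running-max loop that rebuilds [num, i] at every strict increase by two separate library scans: compute max(array) once, then locate its first occurrence with array.index, returning [mx, idx] only when mx exceeds the first element.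
import Mathlib
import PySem

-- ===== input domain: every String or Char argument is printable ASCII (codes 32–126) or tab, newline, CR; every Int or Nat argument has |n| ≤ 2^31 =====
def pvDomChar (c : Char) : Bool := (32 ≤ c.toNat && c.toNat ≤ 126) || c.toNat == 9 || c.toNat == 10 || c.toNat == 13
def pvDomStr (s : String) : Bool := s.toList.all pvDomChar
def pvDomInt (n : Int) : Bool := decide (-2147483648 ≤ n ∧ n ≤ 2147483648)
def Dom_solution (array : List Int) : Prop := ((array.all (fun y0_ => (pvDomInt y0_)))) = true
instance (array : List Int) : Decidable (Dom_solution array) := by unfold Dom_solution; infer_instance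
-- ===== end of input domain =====

-- B replaces A's interleaved running-max loop by two library scans (max, then first index); objective: simpler.

-- ===== PORT A =====
-- the loop 'for i in range(1, len(array))' over array[i], carried as a walk of the tail with index counter i
def solutionGo : List Int → Int → Int → List Int → List Int
  | [], _, _, answer => answer
  | v :: rest, i, num, answer =>
      if v > num then solutionGo rest (i + 1) v [v, i]
      else solutionGo rest (i + 1) num answer

def solution (array : List Int) : List Int :=
  match array with
  | [] => []                 -- reading the first element raises IndexError; excluded by Pre_solution
  | num :: rest => solutionGo rest 1 num []

-- ===== PORT B =====
def solution_alt (array : List Int) : List Int :=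
  match array with
  | [] => []                 -- reading the first element raises IndexError; excluded by Pre_solution
  | first :: _ =>
    match PySem.List.max? array (fun y => y) with
    | none => []
    | some mx =>
      if mx > first then [mx, ((PySem.List.index? array mx).getD 0 : Nat)] else []

-- ===== PRECONDITION & SPEC =====
-- Pre_ excludes only the empty list, on which A (and B) raise IndexError reading the first element.
def Pre_solution (array : List Int) : Prop := array ≠ []
instance (array : List Int) : Decidable (Pre_solution array) := by unfold Pre_solution; infer_instance
def pvWitness_solution : List Int := [1, 3, 2]

def Spec_solution (array : List Int) (out : List Int) : Prop := out = solution_alt array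
instance (array : List Int) (out : List Int) : Decidable (Spec_solution array out) := by unfold Spec_solution; infer_instance

-- ===== CLAIM =====
def Claim_equal_solution : Prop := ∀ (array : List Int), Dom_solution array → Pre_solution array → Spec_solution array (solution array)

-- ===== LEMMAS AND PROOFS =====
-- 'best rest num' = the running-max loop's outcome over the tail: none if nothing exceeds num,
-- else the overall max M of rest together with the first index (offset within rest) where M occurs.
def best : List Int → Int → Option (Int × Nat)
  | [], _ => none
  | v :: rest, num =>
    if v > num then
      match best rest v with
      | none => some (v, 0)
      | some (M, k) => some (M, k + 1)
    else (best rest num).map (fun p => (p.1, p.2 + 1))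

lemma go_best (rest : List Int) : ∀ (i num : Int) (answer : List Int),
    solutionGo rest i num answer =
      match best rest num with
      | none => answer
      | some (M, k) => [M, i + (k : Int)] := by
  induction rest with
  | nil => intro i num answer; simp [solutionGo, best]
  | cons v rest ih =>
    intro i num answer
    by_cases h : v > num
    · simp only [solutionGo, best, if_pos h, ih]
      cases hb : best rest v with
      | none => simp
      | some p => obtain ⟨M, k⟩ := p; push_cast; ring_nf
    · simp only [solutionGo, best, if_neg h, ih]
      cases hb : best rest num with
      | none => simp
      | some p => obtain ⟨M, k⟩ := p; simp only [Option.map_some]; push_cast; ring_nf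

lemma best_none {rest : List Int} : ∀ {num : Int}, best rest num = none →
    ∀ v ∈ rest, v ≤ num := by
  induction rest with
  | nil => intro num _ v hv; simp at hv
  | cons w rest ih =>
    intro num h v hv
    by_cases hw : w > num
    · exfalso; simp only [best, if_pos hw] at h
      cases hb : best rest w <;> simp [hb] at h
    · simp only [best, if_neg hw, Option.map_eq_none_iff] at h
      rcases List.mem_cons.1 hv with rfl | hv
      · omega
      · exact ih h v hv

lemma best_some {rest : List Int} : ∀ {num M : Int} {k : Nat},
    best rest num = some (M, k) →
    num < M ∧ (∀ v ∈ rest, v ≤ M) ∧ PySem.List.index? rest M = some k := by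
  induction rest with
  | nil => intro num M k h; simp [best] at h
  | cons w rest ih =>
    intro num M k h
    by_cases hw : w > num
    · rw [best, if_pos hw] at h
      cases hb : best rest w with
      | none =>
        rw [hb] at h
        obtain ⟨rfl, rfl⟩ : w = M ∧ 0 = k := by simpa using h
        refine ⟨hw, ?_, PySem.List.index?_cons_self w rest⟩
        intro v hv
        rcases List.mem_cons.1 hv with rfl | hv
        · exact le_refl v
        · exact best_none hb v hv
      | some p =>
        obtain ⟨M', k'⟩ := p
        rw [hb] at h
        obtain ⟨rfl, rfl⟩ : M' = M ∧ k' + 1 = k := by simpa using h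
        obtain ⟨h1, h2, h3⟩ := ih hb
        refine ⟨by omega, ?_, ?_⟩
        · intro v hv
          rcases List.mem_cons.1 hv with rfl | hv
          · omega
          · exact h2 v hv
        · rw [PySem.List.index?_cons_of_ne rest (by omega), h3]; rfl
    · rw [best, if_neg hw] at h
      cases hb : best rest num with
      | none => rw [hb] at h; simp at h
      | some p =>
        obtain ⟨M', k'⟩ := p
        rw [hb] at h
        obtain ⟨rfl, rfl⟩ : M' = M ∧ k' + 1 = k := by simpa using h
        obtain ⟨h1, h2, h3⟩ := ih hb
        refine ⟨h1, ?_, ?_⟩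
        · intro v hv
          rcases List.mem_cons.1 hv with rfl | hv
          · omega
          · exact h2 v hv
        · rw [PySem.List.index?_cons_of_ne rest (by omega), h3]; rfl

lemma foldl_max_eq_of_all_le {rest : List Int} {m : Int} (h : ∀ v ∈ rest, v ≤ m) :
    rest.foldl max m = m := by
  have h1 := (PySem.List.le_foldl_max rest m).1
  rcases PySem.List.foldl_max_mem rest m with h2 | h2
  · exact h2
  · exact le_antisymm (h _ h2) h1

lemma foldl_max_eq_of_max_mem {rest : List Int} {m M : Int}
    (hmem : M ∈ rest) (hm : m ≤ M) (hall : ∀ v ∈ rest, v ≤ M) :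
    rest.foldl max m = M := by
  obtain ⟨h1, h2⟩ := PySem.List.le_foldl_max rest m
  rcases PySem.List.foldl_max_mem rest m with h3 | h3
  · have := h2 M hmem; omega
  · exact le_antisymm (hall _ h3) (h2 M hmem)

-- ===== VERDICT =====
theorem solution_spec : Claim_equal_solution := by
  intro array _ hpre
  unfold Spec_solution
  match array with
  | [] => exact absurd rfl hpre
  | m :: rest =>
    simp only [solution, solution_alt, go_best, PySem.List.max?_id_cons]
    cases hb : best rest m with
    | none =>
      have hall := best_none hb
      rw [foldl_max_eq_of_all_le hall]
      simp
    | some p =>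
      obtain ⟨M, k⟩ := p
      obtain ⟨h1, h2, h3⟩ := best_some hb
      have hmem : M ∈ rest := (PySem.List.index?_isSome_iff rest M).1 (by rw [h3]; rfl)
      rw [foldl_max_eq_of_max_mem hmem (le_of_lt h1) h2]
      rw [if_pos h1, PySem.List.index?_cons_of_ne rest (by omega : m ≠ M), h3]
      simp only [Option.map_some, Option.getD_some]
      push_cast; ring_nf
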